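-- pv_equiv track=rewrite | github.com/xNilsson/AdventOfCode | 2025/02.py | part2
-- ===== SOURCE A (Python) =====
-- def part2(x):
--     mid = len(x)//2
--     for idx in range(1, mid + 1):
--         prev = x[:idx]
--         equal = True
--         for c in range(0, len(x), idx):
--             chunk = x[c:c+idx]
--             if chunk != prev:
--                 equal = False
--                 break
--             prev = chunk
--         if equal:
--             return True
--     return False
-- ===== SOURCE B (Python) =====
-- def part2(x):
--     n = len(x)
--     for d in range(1, n // 2 + 1):
--         if n % d == 0 and x[:d] * (n // d) == x:
--             return True
--     return False
-- ===== Notes on version B (the rewrite author's own statement) =====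
-- stated objective: faster
-- what changed: B only tests candidate period lengths that divide len(x) (O(1) modulus filter) and checks each by a single prefix-replication equality, instead of A's inner chunk-by-chunk scan over every length 1..n/2.
import Mathlib
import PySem

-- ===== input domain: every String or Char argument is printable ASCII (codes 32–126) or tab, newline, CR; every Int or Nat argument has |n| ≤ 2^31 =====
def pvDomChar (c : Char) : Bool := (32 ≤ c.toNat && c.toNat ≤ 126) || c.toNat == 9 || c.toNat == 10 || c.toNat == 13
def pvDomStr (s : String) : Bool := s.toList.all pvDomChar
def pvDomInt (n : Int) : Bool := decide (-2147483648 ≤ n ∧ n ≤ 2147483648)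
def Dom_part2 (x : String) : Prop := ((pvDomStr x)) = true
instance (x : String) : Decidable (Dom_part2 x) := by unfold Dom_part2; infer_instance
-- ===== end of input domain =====

-- B tests only candidate period lengths dividing len(x) and checks each by one prefix-replication
-- equality, instead of A's chunk-by-chunk scan for every length 1..len(x)//2 (objective: faster).

-- ===== PORT A =====
-- inner `for c in range(0, len(x), idx)` loop of A, with its early `break` (`equal = False`)
def part2Inner (xs : List Char) (idx : Int) (prev : List Char) : List Int → Bool
  | [] => true
  | c :: rest =>
    let chunk := PySem.List.slice xs (some c) (some (c + idx))
    if chunk ≠ prev then false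
    else part2Inner xs idx chunk rest

-- outer `for idx in range(1, mid + 1)` loop of A, with its early `return True`
def part2Outer (xs : List Char) (n : Int) : List Int → Bool
  | [] => false
  | idx :: rest =>
    if part2Inner xs idx (PySem.List.slice xs none (some idx)) (PySem.List.pyRange 0 n idx)
    then true
    else part2Outer xs n rest

def part2 (x : String) : Bool :=
  let mid := PySem.Int.floordiv (PySem.Str.len x) 2
  part2Outer x.toList (PySem.Str.len x) (PySem.List.pyRange 1 (mid + 1) 1)

-- ===== PORT B =====
-- hand port of Python string repetition `s * k` (exact: a non-positive k yields ""; here k ≥ 2)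
def strRepeat (s : List Char) (k : Int) : List Char :=
  (List.replicate k.toNat s).flatten

-- `for d in range(1, n//2 + 1)` loop of B, with its early `return True`
def part2AltGo (xs : List Char) (n : Int) : List Int → Bool
  | [] => false
  | d :: rest =>
    if PySem.Int.mod n d = 0 ∧ strRepeat (PySem.List.slice xs none (some d)) (PySem.Int.floordiv n d) = xs
    then true
    else part2AltGo xs n rest

def part2_alt (x : String) : Bool :=
  let n := PySem.Str.len x
  part2AltGo x.toList n (PySem.List.pyRange 1 (PySem.Int.floordiv n 2 + 1) 1)

-- ===== PRECONDITION & SPEC =====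
def Spec_part2 (x : String) (out : Bool) : Prop := out = part2_alt x
instance (x : String) (out : Bool) : Decidable (Spec_part2 x out) := by unfold Spec_part2; infer_instance

-- ===== CLAIM (what is proved, stated in full; the proofs are below) =====
def Claim_equal_part2 : Prop := ∀ (x : String), Dom_part2 x → Spec_part2 x (part2 x)

-- ===== LEMMAS AND PROOFS =====

-- `prev` never actually changes in A's inner loop: a chunk is stored back only when equal to `prev`
lemma part2Inner_eq_all (xs : List Char) (idx : Int) (prev : List Char) (cs : List Int) :
    part2Inner xs idx prev cs
      = cs.all (fun c => decide (PySem.List.slice xs (some c) (some (c + idx)) = prev)) := by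
  induction cs generalizing prev with
  | nil => rfl
  | cons c rest ih =>
    simp only [part2Inner, List.all_cons]
    by_cases h : PySem.List.slice xs (some c) (some (c + idx)) = prev
    · simp [← ih, h]
    · simp [h]

lemma int_div_cast (N d : Nat) : PySem.Int.floordiv (N : Int) (d : Int) = ((N / d : Nat) : Int) := by
  show Int.fdiv _ _ = _
  rw [Int.fdiv_eq_ediv_of_nonneg _ (by exact_mod_cast Nat.zero_le d)]
  exact_mod_cast (Int.natCast_div N d).symm

lemma count_lt_iff (N d k : Nat) (hd : 0 < d) : (k < (N + d - 1) / d) ↔ d * k < N := by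
  constructor
  · intro h
    have h2 : (k + 1) * d ≤ (N + d - 1) / d * d := Nat.mul_le_mul_right d h
    have h3 := Nat.div_mul_le_self (N + d - 1) d
    have h4 : (k + 1) * d = d * k + d := by ring
    omega
  · intro h
    have h4 : (k + 1) * d = d * k + d := by ring
    have : k + 1 ≤ (N + d - 1) / d := (Nat.le_div_iff_mul_le hd).mpr (by omega)
    omega

-- range(0, N, d) enumerated as the chunk starts d*k
lemma pyRange_step_eq (N d : Nat) (hd : 0 < d) (hN : 0 < N) :
    PySem.List.pyRange 0 (N : Int) (d : Int) =
      (List.range ((N + d - 1) / d)).map (fun k => ((d * k : Nat) : Int)) := by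
  rw [PySem.List.pyRange_of_pos _ _ (by exact_mod_cast hd)]
  have hcnt : (if (0:Int) < (N:Int) then ((((N:Int)) - 0 + (d:Int) - 1) / (d:Int)).toNat else 0)
      = (N + d - 1) / d := by
    rw [if_pos (by exact_mod_cast hN)]
    have : ((N:Int) - 0 + (d:Int) - 1) = (((N + d - 1 : Nat)) : Int) := by omega
    rw [this, ← Int.natCast_div]
    exact Int.toNat_natCast _
  rw [hcnt]
  apply List.map_congr_left
  intro k _
  push_cast
  ring

lemma flatten_replicate_succ (p : List Char) (m : Nat) :
    (List.replicate (m + 1) p).flatten = p ++ (List.replicate m p).flatten := by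
  simp [List.replicate_succ]

lemma drop_flatten_replicate (p : List Char) (m : Nat) :
    ((List.replicate (m + 1) p).flatten).drop p.length = (List.replicate m p).flatten := by
  rw [flatten_replicate_succ, List.drop_left]

-- every aligned window of p-repeated-m-times is p
lemma chunks_of_flatten (p : List Char) : ∀ (m k : Nat), k < m →
    (((List.replicate m p).flatten).drop (p.length * k)).take p.length = p := by
  intro m
  induction m with
  | zero => intro k hk; omega
  | succ m ih =>
    intro k hk
    cases k with
    | zero => simp [flatten_replicate_succ]
    | succ j =>
      have h1 : ((List.replicate (m + 1) p).flatten).drop (p.length * (j + 1))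
          = ((List.replicate m p).flatten).drop (p.length * j) := by
        rw [← drop_flatten_replicate p m, List.drop_drop]
        congr 1
        ring
      rw [h1]
      exact ih j (by omega)

-- if all d-chunks of xs equal p then xs is p repeated a whole number of times
lemma rep_of_chunks (d : Nat) (hd : 0 < d) (p : List Char) (hp : p.length = d) :
    ∀ (n : Nat) (xs : List Char), xs.length ≤ n →
      (∀ k, d * k < xs.length → (xs.drop (d * k)).take d = p) →
      (d ∣ xs.length ∧ xs = (List.replicate (xs.length / d) p).flatten) := by
  intro n
  induction n with
  | zero =>
    intro xs hlen _
    have hx : xs = [] := List.eq_nil_of_length_eq_zero (by omega)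
    subst hx
    simp
  | succ n ih =>
    intro xs hlen h
    by_cases hnil : xs = []
    · subst hnil; simp
    have hN : 0 < xs.length := List.length_pos_iff.mpr hnil
    by_cases hsmall : xs.length < d
    · exfalso
      have h0 := h 0 (by simpa using hN)
      rw [Nat.mul_zero, List.drop_zero] at h0
      have : p.length = xs.length := by rw [← h0]; simp; omega
      omega
    push Not at hsmall
    set ys := xs.drop d with hys
    have hylen : ys.length = xs.length - d := by simp [hys]
    have h0 : xs.take d = p := by
      have := h 0 (by simpa using hN)
      simpa using this
    have hshift : ∀ k, d * k < ys.length → (ys.drop (d * k)).take d = p := by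
      intro k hk
      have hdk : d * (k + 1) = d * k + d := by ring
      have heq : ys.drop (d * k) = xs.drop (d * (k + 1)) := by
        rw [hys, List.drop_drop]
        congr 1
        omega
      rw [heq]
      exact h (k + 1) (by omega)
    obtain ⟨hdvd, hrep⟩ := ih ys (by omega) hshift
    have hdvd' : d ∣ xs.length := by
      have hxe : xs.length = ys.length + d := by omega
      rw [hxe]
      exact Nat.dvd_add hdvd ⟨1, by omega⟩
    refine ⟨hdvd', ?_⟩
    have hq : xs.length / d = ys.length / d + 1 := by
      have hxe : xs.length = ys.length + d := by omega
      rw [hxe, Nat.add_div_right _ hd]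
    rw [hq, List.replicate_succ, List.flatten_cons, ← hrep, ← h0, hys]
    exact (List.take_append_drop d xs).symm

lemma rep_iff (d : Nat) (hd : 0 < d) (p : List Char) (hp : p.length = d) (xs : List Char) :
    (∀ k, d * k < xs.length → (xs.drop (d * k)).take d = p) ↔
      (d ∣ xs.length ∧ xs = (List.replicate (xs.length / d) p).flatten) := by
  constructor
  · exact rep_of_chunks d hd p hp xs.length xs le_rfl
  · rintro ⟨hdvd, hrep⟩
    obtain ⟨m, hm⟩ := hdvd
    have hmq : xs.length / d = m := by rw [hm, Nat.mul_div_cancel_left _ hd]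
    intro k hk
    have hkm : k < m := by
      by_contra hkm
      push Not at hkm
      have := Nat.mul_le_mul_left d hkm
      omega
    rw [hmq] at hrep
    rw [hrep, ← hp]
    exact chunks_of_flatten p m k hkm

-- per-candidate agreement: A's inner scan succeeds exactly when B's divisibility + replication test does
lemma per_idx (xs : List Char) (d : Nat) (h1 : 1 ≤ d) (h2 : d ≤ xs.length / 2) :
    (part2Inner xs (d : Int) (PySem.List.slice xs none (some (d : Int)))
        (PySem.List.pyRange 0 (xs.length : Int) (d : Int)) = true)
      ↔ (PySem.Int.mod (xs.length : Int) (d : Int) = 0 ∧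
          strRepeat (PySem.List.slice xs none (some (d : Int))) (PySem.Int.floordiv (xs.length : Int) (d : Int)) = xs) := by
  set N := xs.length with hN
  have hNd : d ≤ N := le_trans h2 (Nat.div_le_self _ _)
  have hN0 : 0 < N := by omega
  have hp : (xs.take d).length = d := by simp; omega
  rw [PySem.List.slice_to_natCast, part2Inner_eq_all, pyRange_step_eq N d (by omega) hN0,
    List.all_eq_true, List.forall_mem_map]
  have step1 : (∀ k ∈ List.range ((N + d - 1) / d),
        decide (PySem.List.slice xs (some ((d * k : Nat) : Int)) (some (((d * k : Nat) : Int) + (d : Int))) = xs.take d) = true)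
      ↔ (∀ k, d * k < N → (xs.drop (d * k)).take d = xs.take d) := by
    constructor
    · intro h k hk
      have hmem := h k (List.mem_range.mpr ((count_lt_iff N d k (by omega)).mpr hk))
      simpa only [PySem.List.slice_natCast_add, decide_eq_true_eq] using hmem
    · intro h k hk
      have hk' := (count_lt_iff N d k (by omega)).mp (List.mem_range.mp hk)
      simpa only [PySem.List.slice_natCast_add, decide_eq_true_eq] using h k hk'
  rw [step1, rep_iff d (by omega) (xs.take d) hp xs, ← hN]
  rw [PySem.Int.mod_eq_zero_iff_dvd, int_div_cast]
  constructor
  · rintro ⟨hdvd, hrep⟩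
    refine ⟨by exact_mod_cast hdvd, ?_⟩
    simp only [strRepeat, Int.toNat_natCast]
    exact hrep.symm
  · rintro ⟨hdvd, hrep⟩
    refine ⟨by exact_mod_cast hdvd, ?_⟩
    simp only [strRepeat, Int.toNat_natCast] at hrep
    exact hrep.symm

-- the two outer loops agree link by link
lemma outer_congr (xs : List Char) (l : List Int)
    (h : ∀ i ∈ l, (part2Inner xs i (PySem.List.slice xs none (some i)) (PySem.List.pyRange 0 (xs.length : Int) i) = true)
        ↔ (PySem.Int.mod (xs.length : Int) i = 0 ∧
            strRepeat (PySem.List.slice xs none (some i)) (PySem.Int.floordiv (xs.length : Int) i) = xs)) :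
    part2Outer xs (xs.length : Int) l = part2AltGo xs (xs.length : Int) l := by
  induction l with
  | nil => rfl
  | cons i rest ih =>
    simp only [part2Outer, part2AltGo]
    have hi := h i (List.mem_cons_self)
    by_cases hc : part2Inner xs i (PySem.List.slice xs none (some i)) (PySem.List.pyRange 0 (xs.length : Int) i) = true
    · rw [if_pos hc, if_pos (hi.mp hc)]
    · rw [if_neg (by simpa using hc), if_neg (fun hb => hc (hi.mpr hb))]
      exact ih (fun j hj => h j (List.mem_cons_of_mem _ hj))

-- ===== VERDICT (by name: the statement is the Claim_ definition above) =====
theorem part2_spec : Claim_equal_part2 := by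
  intro x _
  unfold Spec_part2 part2 part2_alt
  simp only [PySem.Str.len_eq]
  set xs := x.toList
  set N := xs.length with hN
  rw [show (2:Int) = ((2:Nat):Int) from rfl, int_div_cast N 2]
  apply outer_congr
  intro i hi
  rw [PySem.List.mem_pyRange_one] at hi
  obtain ⟨h1, h2⟩ := hi
  have hd : i = ((i.toNat : Nat) : Int) := by omega
  set d := i.toNat with hdd
  have hd1 : 1 ≤ d := by omega
  have hd2 : d ≤ N / 2 := by omega
  rw [hd]
  exact per_idx xs d hd1 hd2
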